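-- pv_equiv track=rewrite | github.com/mh-majumdar/AI-Chat-Log-Summarizer | utils.py | parse_chat_log
-- ===== SOURCE A (Python) =====
-- def parse_chat_log(text):
--     messages = []
--     lines = text.strip().split('\n')
--     for line in lines:
--         if line.startswith('User:'):
--             messages.append({"speaker": "User", "message": line[5:].strip()})
--         elif line.startswith('AI:'):
--             messages.append({"speaker": "AI", "message": line[3:].strip()})
--     return messages
-- ===== SOURCE B (Python) =====
-- def parse_chat_log(text):
--     out = []
--     for line in text.strip().split('\n'):
--         key, sep, rest = line.partition(':')
--         if sep and key in ('User', 'AI'):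
--             out.append({"speaker": key, "message": rest.strip()})
--     return out
-- ===== Notes on version B (the rewrite author's own statement) =====
-- stated objective: idiomatic
-- what changed: Replaces the ordered startswith prefix tests with hardcoded slice offsets (5 and 3) by a single tokenize-then-dispatch step: partition each line at its first colon and exact-match the speaker token against ('User','AI').
import Mathlib
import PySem

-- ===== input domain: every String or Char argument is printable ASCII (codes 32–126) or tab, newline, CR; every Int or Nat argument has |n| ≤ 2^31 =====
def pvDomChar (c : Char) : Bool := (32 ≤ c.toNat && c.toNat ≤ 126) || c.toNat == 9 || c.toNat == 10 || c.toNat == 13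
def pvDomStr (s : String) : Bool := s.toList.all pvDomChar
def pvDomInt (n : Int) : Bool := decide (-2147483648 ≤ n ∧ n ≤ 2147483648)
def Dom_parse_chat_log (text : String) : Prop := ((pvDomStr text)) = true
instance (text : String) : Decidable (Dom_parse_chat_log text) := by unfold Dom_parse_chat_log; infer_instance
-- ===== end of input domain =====

-- B replaces A's ordered startswith prefix tests and hardcoded slice offsets by
-- partition-at-first-colon plus an exact-match speaker lookup (objective: idiomatic).

-- ===== PORT A =====
def parse_chat_log (text : String) : List (List (String × String)) :=
  let lines := (PySem.Str.split? (PySem.Str.strip text) "\n").getD []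
  lines.foldl (fun messages line =>
    if PySem.Str.startswith line "User:" then
      messages ++ [[("speaker", "User"),
                    ("message", PySem.Str.strip (PySem.Str.slice line (some 5) none))]]
    else if PySem.Str.startswith line "AI:" then
      messages ++ [[("speaker", "AI"),
                    ("message", PySem.Str.strip (PySem.Str.slice line (some 3) none))]]
    else messages) []

-- ===== PORT B =====
-- line.partition(':') ported by hand (exact: the part before the first ':',
-- whether a ':' was found, and the remainder after it)
def pvPartitionColon (cs : List Char) : List Char × Bool × List Char :=
  match cs with
  | [] => ([], false, [])
  | c :: rest =>
    if c = ':' then ([], true, rest)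
    else
      let p := pvPartitionColon rest
      (c :: p.1, p.2.1, p.2.2)

def parse_chat_log_alt (text : String) : List (List (String × String)) :=
  let lines := (PySem.Str.split? (PySem.Str.strip text) "\n").getD []
  lines.foldl (fun out line =>
    let p := pvPartitionColon line.toList
    if p.2.1 && (p.1 = "User".toList || p.1 = "AI".toList) then
      out ++ [[("speaker", String.ofList p.1),
               ("message", PySem.Str.strip (String.ofList p.2.2))]]
    else out) []

-- ===== PRECONDITION & SPEC =====
def Spec_parse_chat_log (text : String) (out : List (List (String × String))) : Prop := out = parse_chat_log_alt text
instance (text : String) (out : List (List (String × String))) : Decidable (Spec_parse_chat_log text out) := by unfold Spec_parse_chat_log; infer_instance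

-- ===== CLAIM (what is proved, stated in full; the proofs are below) =====
def Claim_equal_parse_chat_log : Prop := ∀ (text : String), Dom_parse_chat_log text → Spec_parse_chat_log text (parse_chat_log text)

-- ===== LEMMAS AND PROOFS =====

/-- Characterisation of the hand-ported `partition(':')`. -/
lemma pvPartitionColon_spec (cs : List Char) :
    (pvPartitionColon cs = (cs, false, []) ∧ ':' ∉ cs) ∨
    (cs = (pvPartitionColon cs).1 ++ ':' :: (pvPartitionColon cs).2.2 ∧
      (pvPartitionColon cs).2.1 = true ∧ ':' ∉ (pvPartitionColon cs).1) := by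
  induction cs with
  | nil => simp [pvPartitionColon]
  | cons c rest ih =>
    by_cases hc : c = ':'
    · subst hc; right; simp [pvPartitionColon]
    · rcases ih with ⟨h1, h2⟩ | ⟨h1, h2, h3⟩
      · left
        constructor
        · simp [pvPartitionColon, hc, h1]
        · simp [h2]
          exact Ne.symm hc
      · right
        refine ⟨?_, ?_, ?_⟩
        · simp [pvPartitionColon, hc]
          exact h1
        · simp [pvPartitionColon, hc, h2]
        · simp [pvPartitionColon, hc]
          exact ⟨Ne.symm hc, h3⟩

/-- A split at a colon with no colon before it is unique. -/
lemma first_colon_unique (k₁ : List Char) :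
    ∀ (k₂ r₁ r₂ : List Char), ':' ∉ k₁ → ':' ∉ k₂ →
    k₁ ++ ':' :: r₁ = k₂ ++ ':' :: r₂ → k₁ = k₂ ∧ r₁ = r₂ := by
  induction k₁ with
  | nil =>
    intro k₂ r₁ r₂ _ h2 heq
    cases k₂ with
    | nil => simpa using heq
    | cons b t =>
      simp at heq
      exact absurd (heq.1 ▸ List.mem_cons_self) h2
  | cons a t ih =>
    intro k₂ r₁ r₂ h1 h2 heq
    cases k₂ with
    | nil =>
      simp at heq
      exact absurd (heq.1 ▸ List.mem_cons_self) h1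
    | cons b t₂ =>
      simp only [List.cons_append, List.cons.injEq] at heq
      have h1' : ':' ∉ t := fun h => h1 (List.mem_cons_of_mem _ h)
      have h2' : ':' ∉ t₂ := fun h => h2 (List.mem_cons_of_mem _ h)
      obtain ⟨hk, hr⟩ := ih t₂ r₁ r₂ h1' h2' heq.2
      exact ⟨by rw [heq.1, hk], hr⟩

/-- Per-line agreement of the two step functions. -/
lemma step_eq (m : List (List (String × String))) (line : String) :
    (if PySem.Str.startswith line "User:" then
      m ++ [[("speaker", "User"),
             ("message", PySem.Str.strip (PySem.Str.slice line (some 5) none))]]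
    else if PySem.Str.startswith line "AI:" then
      m ++ [[("speaker", "AI"),
             ("message", PySem.Str.strip (PySem.Str.slice line (some 3) none))]]
    else m) =
    (let p := pvPartitionColon line.toList
     if p.2.1 && (p.1 = "User".toList || p.1 = "AI".toList) then
      m ++ [[("speaker", String.ofList p.1),
             ("message", PySem.Str.strip (String.ofList p.2.2))]]
     else m) := by
  rcases pvPartitionColon_spec line.toList with ⟨hp, hno⟩ | ⟨hsplit, htrue, hkey⟩
  · -- no colon in the line: both sides skip it
    have hu : PySem.Chars.startswith line.toList ['U','s','e','r',':'] = false := by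
      rw [Bool.eq_false_iff]
      intro h
      have hpre := (PySem.Chars.startswith_iff _ _).mp h
      exact hno (hpre.subset (by decide))
    have ha : PySem.Chars.startswith line.toList ['A','I',':'] = false := by
      rw [Bool.eq_false_iff]
      intro h
      have hpre := (PySem.Chars.startswith_iff _ _).mp h
      exact hno (hpre.subset (by decide))
    simp [hu, ha, hp]
  · -- a colon was found: line.toList = key ++ ':' :: rest
    obtain ⟨⟨k, b, r⟩, hP⟩ : ∃ q, pvPartitionColon line.toList = q := ⟨_, rfl⟩
    rw [hP] at hsplit htrue hkey
    have hsplit' : line.toList = k ++ ':' :: r := hsplit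
    have hkey' : ':' ∉ k := hkey
    have hb : b = true := htrue
    clear hsplit htrue hkey
    subst hb
    simp only [hP]
    by_cases hU : k = "User".toList
    · have hlist : line.toList = ['U','s','e','r',':'] ++ r := by
        rw [hsplit', hU]; rfl
      have hu : PySem.Chars.startswith line.toList ['U','s','e','r',':'] = true := by
        rw [PySem.Chars.startswith_iff]
        exact ⟨r, hlist.symm⟩
      have hmsg : (PySem.Str.slice line (some 5) none).toList = r := by
        rw [PySem.Str.toList_slice, PySem.Chars.slice_eq_listSlice,
          PySem.List.slice_from _ (by norm_num : (0:Int) ≤ 5), hlist]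
        rfl
      have e1 : String.ofList ['U','s','e','r'] = "User" := by decide
      have e2 : PySem.Str.strip (PySem.Str.slice line (some 5) none) =
          PySem.Str.strip (String.ofList r) := by
        simp [PySem.Str.strip, hmsg]
      simp [hu, hU, e1, e2]
    · by_cases hA : k = "AI".toList
      · have hlist : line.toList = ['A','I',':'] ++ r := by
          rw [hsplit', hA]; rfl
        have hu : PySem.Chars.startswith line.toList ['U','s','e','r',':'] = false := by
          rw [Bool.eq_false_iff]
          intro h
          obtain ⟨t, ht⟩ := (PySem.Chars.startswith_iff _ _).mp h
          have heq : ['U','s','e','r'] ++ ':' :: t = k ++ ':' :: r := by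
            rw [← hsplit', ← ht]; rfl
          have hk := (first_colon_unique _ _ _ _ (by decide) hkey' heq).1.symm
          rw [hA] at hk
          exact absurd hk (by decide)
        have ha : PySem.Chars.startswith line.toList ['A','I',':'] = true := by
          rw [PySem.Chars.startswith_iff]
          exact ⟨r, hlist.symm⟩
        have hmsg : (PySem.Str.slice line (some 3) none).toList = r := by
          rw [PySem.Str.toList_slice, PySem.Chars.slice_eq_listSlice,
            PySem.List.slice_from _ (by norm_num : (0:Int) ≤ 3), hlist]
          rfl
        have e1 : String.ofList ['A','I'] = "AI" := by decide
        have e2 : PySem.Str.strip (PySem.Str.slice line (some 3) none) =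
            PySem.Str.strip (String.ofList r) := by
          simp [PySem.Str.strip, hmsg]
        simp [hu, ha, hA, e1, e2]
      · -- colon found but the key is neither speaker: both sides skip it
        have hu : PySem.Chars.startswith line.toList ['U','s','e','r',':'] = false := by
          rw [Bool.eq_false_iff]
          intro h
          obtain ⟨t, ht⟩ := (PySem.Chars.startswith_iff _ _).mp h
          have heq : ['U','s','e','r'] ++ ':' :: t = k ++ ':' :: r := by
            rw [← hsplit', ← ht]; rfl
          exact hU ((first_colon_unique _ _ _ _ (by decide) hkey' heq).1.symm)
        have ha : PySem.Chars.startswith line.toList ['A','I',':'] = false := by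
          rw [Bool.eq_false_iff]
          intro h
          obtain ⟨t, ht⟩ := (PySem.Chars.startswith_iff _ _).mp h
          have heq : ['A','I'] ++ ':' :: t = k ++ ':' :: r := by
            rw [← hsplit', ← ht]; rfl
          exact hA ((first_colon_unique _ _ _ _ (by decide) hkey' heq).1.symm)
        have hU' : ¬ k = ['U','s','e','r'] := hU
        have hA' : ¬ k = ['A','I'] := hA
        simp [hu, ha, hU', hA']

lemma foldl_ext {α β : Type} (f g : α → β → α) (h : ∀ a b, f a b = g a b) (l : List β) (a : α) :
    l.foldl f a = l.foldl g a := by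
  have : f = g := funext fun a => funext fun b => h a b
  rw [this]

-- ===== VERDICT (by name: the statement is the Claim_ definition above) =====
theorem parse_chat_log_spec : Claim_equal_parse_chat_log := by
  intro text _
  unfold Spec_parse_chat_log parse_chat_log parse_chat_log_alt
  exact foldl_ext _ _ step_eq _ _
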